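-- pv_equiv track=rewrite | github.com/mrMaks2/crm_system_dev | leftovers/views.py | distribute_stocks_to_merged_regions
-- ===== SOURCE A (Python) =====
-- def distribute_stocks_to_merged_regions(stock_info, merged_regions):
--     """
--     Распределяет остатки по складам на объединенные регионы
--     """
--     region_stocks = {region: 0 for region in merged_regions}
--
--     # Маппинг складов на объединенные регионы
--     warehouse_to_merged_region = {
--         # Центральный + Беларусь
--         'Рязань (Тюшевское)': 'Центральный + Беларусь',
--         'Сабурово': 'Центральный + Беларусь',
--         'Владимир': 'Центральный + Беларусь',
--         'Тула': 'Центральный + Беларусь',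
--         'Котовск': 'Центральный + Беларусь',
--         'Электросталь': 'Центральный + Беларусь',
--         'Воронеж': 'Центральный + Беларусь',
--         'Обухово': 'Центральный + Беларусь',
--         'Коледино': 'Центральный + Беларусь',
--         'Белая дача': 'Центральный + Беларусь',
--         'Подольск': 'Центральный + Беларусь',
--         'Щербинка': 'Центральный + Беларусь',
--         'Чехов 1': 'Центральный + Беларусь',
--         'Чехов 2': 'Центральный + Беларусь',
--         'Белые Столбы': 'Центральный + Беларусь',
--         'Минск': 'Центральный + Беларусь',
--
--         # Приволжский
--         'Кузнецк СГТ': 'Приволжский',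
--         'Пенза': 'Приволжский',
--         'Самара (Новосемейкино)': 'Приволжский',
--         'Сарапул': 'Приволжский',
--         'Казань': 'Приволжский',
--
--         # Южный + Северо-Кавказский + Армения + Азербайджан
--         'Волгоград': 'Южный + Северо-Кавказский + Армения + Азербайджан',
--         'Невинномысск': 'Южный + Северо-Кавказский + Армения + Азербайджан',
--         'Краснодар': 'Южный + Северо-Кавказский + Армения + Азербайджан',
--         'СЦ Ереван': 'Южный + Северо-Кавказский + Армения + Азербайджан',
--
--         # Уральский + Казахстан + Узбекистан + Кыргызстан
--         'Челябинск СГТ': 'Уральский + Казахстан + Узбекистан + Кыргызстан',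
--         'Екатеринбург - Испытателей 14г': 'Уральский + Казахстан + Узбекистан + Кыргызстан',
--         'Екатеринбург - Перспективный 12': 'Уральский + Казахстан + Узбекистан + Кыргызстан',
--         'Атакент': 'Уральский + Казахстан + Узбекистан + Кыргызстан',
--         'Актобе': 'Уральский + Казахстан + Узбекистан + Кыргызстан',
--         'Астана Карагандинское шоссе': 'Уральский + Казахстан + Узбекистан + Кыргызстан',
--         'Ташкент': 'Уральский + Казахстан + Узбекистан + Кыргызстан',
--
--         # Северо-Западный
--         'Санкт-Петербург СГТ': 'Северо-Западный',
--         'СПБ Шушары': 'Северо-Западный',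
--         'Санкт-Петербург Уткина Заводь': 'Северо-Западный',
--
--         # Дальневосточный + Сибирский
--         'Хабаровск': 'Дальневосточный + Сибирский',
--         'Новосибирск': 'Дальневосточный + Сибирский'
--     }
--
--     # Распределяем остатки по объединенным регионам
--     for warehouse, stock in stock_info['warehouses'].items():
--         if warehouse in warehouse_to_merged_region:
--             region = warehouse_to_merged_region[warehouse]
--             if region in region_stocks:
--                 region_stocks[region] += stock
--
--     return region_stocks
-- ===== SOURCE B (Python) =====
-- # Inverse index: merged region -> the fixed list of warehouses that feed it.
-- _REGION_WAREHOUSES = {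
--     'Центральный + Беларусь': ['Рязань (Тюшевское)', 'Сабурово', 'Владимир', 'Тула',
--         'Котовск', 'Электросталь', 'Воронеж', 'Обухово', 'Коледино', 'Белая дача',
--         'Подольск', 'Щербинка', 'Чехов 1', 'Чехов 2', 'Белые Столбы', 'Минск'],
--     'Приволжский': ['Кузнецк СГТ', 'Пенза', 'Самара (Новосемейкино)', 'Сарапул', 'Казань'],
--     'Южный + Северо-Кавказский + Армения + Азербайджан':
--         ['Волгоград', 'Невинномысск', 'Краснодар', 'СЦ Ереван'],
--     'Уральский + Казахстан + Узбекистан + Кыргызстан':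
--         ['Челябинск СГТ', 'Екатеринбург - Испытателей 14г', 'Екатеринбург - Перспективный 12',
--          'Атакент', 'Актобе', 'Астана Карагандинское шоссе', 'Ташкент'],
--     'Северо-Западный': ['Санкт-Петербург СГТ', 'СПБ Шушары', 'Санкт-Петербург Уткина Заводь'],
--     'Дальневосточный + Сибирский': ['Хабаровск', 'Новосибирск'],
-- }
--
--
-- def distribute_stocks_to_merged_regions(stock_info, merged_regions):
--     warehouses = stock_info['warehouses']
--     result = {}
--     for region in merged_regions:
--         if region not in result:
--             total = 0
--             for w in _REGION_WAREHOUSES.get(region, []):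
--                 total += warehouses.get(w, 0)
--             result[region] = total
--     return result
-- ===== Notes on version B (the rewrite author's own statement) =====
-- stated objective: alternative
-- what changed: B replaces A's scan-every-input-warehouse-and-classify loop by a literal inverse index (merged region -> its fixed warehouse list) and computes each region's total by probing only that region's warehouses in the stock dict, deduplicating regions as it goes; the input warehouse dict is never iterated.
-- outside the precondition, e.g. on distribute_stocks_to_merged_regions({}, []): A raises KeyError, B raises KeyError
import Mathlib
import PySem

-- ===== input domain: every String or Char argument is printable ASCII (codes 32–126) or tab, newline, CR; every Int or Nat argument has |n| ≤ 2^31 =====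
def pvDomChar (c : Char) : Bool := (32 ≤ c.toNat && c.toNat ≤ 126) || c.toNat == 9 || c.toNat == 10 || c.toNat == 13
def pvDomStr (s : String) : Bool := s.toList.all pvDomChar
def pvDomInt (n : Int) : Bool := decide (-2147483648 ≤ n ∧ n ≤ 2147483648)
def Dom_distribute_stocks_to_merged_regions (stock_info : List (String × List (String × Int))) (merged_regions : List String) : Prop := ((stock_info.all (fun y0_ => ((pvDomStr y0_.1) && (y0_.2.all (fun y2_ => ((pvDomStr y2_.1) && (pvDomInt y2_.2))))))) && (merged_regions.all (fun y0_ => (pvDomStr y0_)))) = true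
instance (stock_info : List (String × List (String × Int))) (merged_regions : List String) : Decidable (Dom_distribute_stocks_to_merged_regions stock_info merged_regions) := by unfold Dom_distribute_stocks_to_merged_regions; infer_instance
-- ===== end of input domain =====

-- B inverts the traversal: instead of scanning every input warehouse and classifying it (A),
-- it keeps a literal inverse index (merged region -> its fixed warehouses) and sums, per
-- requested region, only that region's warehouses from the stock dict; alternative decomposition, same values.
-- ===== PORT A =====
-- The constant warehouse -> merged-region mapping from A's body (kept as a top-level literal).
def pvW2RList : List (String × String) := [
  ("Рязань (Тюшевское)", "Центральный + Беларусь"),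
  ("Сабурово", "Центральный + Беларусь"),
  ("Владимир", "Центральный + Беларусь"),
  ("Тула", "Центральный + Беларусь"),
  ("Котовск", "Центральный + Беларусь"),
  ("Электросталь", "Центральный + Беларусь"),
  ("Воронеж", "Центральный + Беларусь"),
  ("Обухово", "Центральный + Беларусь"),
  ("Коледино", "Центральный + Беларусь"),
  ("Белая дача", "Центральный + Беларусь"),
  ("Подольск", "Центральный + Беларусь"),
  ("Щербинка", "Центральный + Беларусь"),
  ("Чехов 1", "Центральный + Беларусь"),
  ("Чехов 2", "Центральный + Беларусь"),
  ("Белые Столбы", "Центральный + Беларусь"),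
  ("Минск", "Центральный + Беларусь"),
  ("Кузнецк СГТ", "Приволжский"),
  ("Пенза", "Приволжский"),
  ("Самара (Новосемейкино)", "Приволжский"),
  ("Сарапул", "Приволжский"),
  ("Казань", "Приволжский"),
  ("Волгоград", "Южный + Северо-Кавказский + Армения + Азербайджан"),
  ("Невинномысск", "Южный + Северо-Кавказский + Армения + Азербайджан"),
  ("Краснодар", "Южный + Северо-Кавказский + Армения + Азербайджан"),
  ("СЦ Ереван", "Южный + Северо-Кавказский + Армения + Азербайджан"),
  ("Челябинск СГТ", "Уральский + Казахстан + Узбекистан + Кыргызстан"),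
  ("Екатеринбург - Испытателей 14г", "Уральский + Казахстан + Узбекистан + Кыргызстан"),
  ("Екатеринбург - Перспективный 12", "Уральский + Казахстан + Узбекистан + Кыргызстан"),
  ("Атакент", "Уральский + Казахстан + Узбекистан + Кыргызстан"),
  ("Актобе", "Уральский + Казахстан + Узбекистан + Кыргызстан"),
  ("Астана Карагандинское шоссе", "Уральский + Казахстан + Узбекистан + Кыргызстан"),
  ("Ташкент", "Уральский + Казахстан + Узбекистан + Кыргызстан"),
  ("Санкт-Петербург СГТ", "Северо-Западный"),
  ("СПБ Шушары", "Северо-Западный"),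
  ("Санкт-Петербург Уткина Заводь", "Северо-Западный"),
  ("Хабаровск", "Дальневосточный + Сибирский"),
  ("Новосибирск", "Дальневосточный + Сибирский")
]

def distribute_stocks_to_merged_regions (stock_info : List (String × List (String × Int))) (merged_regions : List String) : List (String × Int) :=
  let region_stocks : PySem.Dict String Int :=
    merged_regions.foldl (fun d region => d.insert region 0) PySem.Dict.empty
  let warehouse_to_merged_region : PySem.Dict String String := PySem.Dict.mk pvW2RList
  let warehouses : List (String × Int) := ((PySem.Dict.mk stock_info).get? "warehouses").getD []
  let final := warehouses.foldl (fun rs p =>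
    match warehouse_to_merged_region.get? p.1 with
    | some region => if rs.contains region then rs.modify region 0 (fun v => v + p.2) else rs
    | none => rs) region_stocks
  final.items

-- ===== PORT B =====
-- B's constant inverse index, a literal: merged region -> the warehouses that feed it.
def pvRegionWarehouses : List (String × List String) := [
  ("Центральный + Беларусь", ["Рязань (Тюшевское)", "Сабурово", "Владимир", "Тула", "Котовск", "Электросталь", "Воронеж", "Обухово", "Коледино", "Белая дача", "Подольск", "Щербинка", "Чехов 1", "Чехов 2", "Белые Столбы", "Минск"]),
  ("Приволжский", ["Кузнецк СГТ", "Пенза", "Самара (Новосемейкино)", "Сарапул", "Казань"]),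
  ("Южный + Северо-Кавказский + Армения + Азербайджан", ["Волгоград", "Невинномысск", "Краснодар", "СЦ Ереван"]),
  ("Уральский + Казахстан + Узбекистан + Кыргызстан", ["Челябинск СГТ", "Екатеринбург - Испытателей 14г", "Екатеринбург - Перспективный 12", "Атакент", "Актобе", "Астана Карагандинское шоссе", "Ташкент"]),
  ("Северо-Западный", ["Санкт-Петербург СГТ", "СПБ Шушары", "Санкт-Петербург Уткина Заводь"]),
  ("Дальневосточный + Сибирский", ["Хабаровск", "Новосибирск"])
]

-- total += warehouses.get(w, 0) over the region's fixed warehouse list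
def pvRegionTotal (warehouses : PySem.Dict String Int) (region : String) : Int :=
  ((PySem.Dict.mk pvRegionWarehouses).getD region []).foldl
    (fun total w => total + warehouses.getD w 0) 0

-- the 'for region in merged_regions' loop: result dict built key by key, skipping seen regions
def pvDistribute (warehouses : PySem.Dict String Int) (seen : List String) : List String → List (String × Int)
  | [] => []
  | r :: rs =>
      if PySem.Set.contains seen r then pvDistribute warehouses seen rs
      else (r, pvRegionTotal warehouses r) :: pvDistribute warehouses (seen ++ [r]) rs

def distribute_stocks_to_merged_regions_alt (stock_info : List (String × List (String × Int))) (merged_regions : List String) : List (String × Int) :=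
  let warehouses : PySem.Dict String Int :=
    PySem.Dict.mk (((PySem.Dict.mk stock_info).get? "warehouses").getD [])
  pvDistribute warehouses [] merged_regions

-- ===== PRECONDITION & SPEC =====
-- Pre_ excludes inputs without a 'warehouses' key (A raises KeyError there, and so does B) and
-- association lists with duplicate dict keys, which no Python dict can represent (first-vs-last
-- match there is an accident of the list encoding).
def Pre_distribute_stocks_to_merged_regions (stock_info : List (String × List (String × Int))) (merged_regions : List String) : Prop :=
  (PySem.Dict.mk stock_info).contains "warehouses" = true ∧
  (stock_info.map Prod.fst).Nodup ∧
  ∀ p ∈ stock_info, (p.2.map Prod.fst).Nodup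
instance (stock_info : List (String × List (String × Int))) (merged_regions : List String) : Decidable (Pre_distribute_stocks_to_merged_regions stock_info merged_regions) := by unfold Pre_distribute_stocks_to_merged_regions; infer_instance

def pvWitness_distribute_stocks_to_merged_regions : (List (String × List (String × Int))) × List String :=
  ([("warehouses", [("a", 1)])], ["b"])

def Spec_distribute_stocks_to_merged_regions (stock_info : List (String × List (String × Int))) (merged_regions : List String) (out : List (String × Int)) : Prop := out = distribute_stocks_to_merged_regions_alt stock_info merged_regions
instance (stock_info : List (String × List (String × Int))) (merged_regions : List String) (out : List (String × Int)) : Decidable (Spec_distribute_stocks_to_merged_regions stock_info merged_regions out) := by unfold Spec_distribute_stocks_to_merged_regions; infer_instance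

-- ===== CLAIM (what is proved, stated in full; the proofs are below) =====
def Claim_equal_distribute_stocks_to_merged_regions : Prop := ∀ (stock_info : List (String × List (String × Int))) (merged_regions : List String), Dom_distribute_stocks_to_merged_regions stock_info merged_regions → Pre_distribute_stocks_to_merged_regions stock_info merged_regions → Spec_distribute_stocks_to_merged_regions stock_info merged_regions (distribute_stocks_to_merged_regions stock_info merged_regions)

-- ===== LEMMAS AND PROOFS =====

-- A's warehouse->region map, grouped by region: equals B's literal inverse index.
def pvRW : PySem.Dict String (List String) :=
  pvW2RList.foldl (fun d p => d.modify p.2 [] (fun l => l ++ [p.1])) PySem.Dict.empty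

set_option maxRecDepth 4000 in
theorem pvRW_eq : pvRW = PySem.Dict.mk pvRegionWarehouses := by decide

-- A's per-region total over the warehouse list, as a closed sum.
def pvSumA (ws : List (String × Int)) (r : String) : Int :=
  (ws.map (fun q => if (PySem.Dict.mk pvW2RList).get? q.1 = some r then q.2 else 0)).sum

theorem pv_keys_nodup : (pvW2RList.map Prod.fst).Nodup := by decide

theorem pv_list_nodup : pvW2RList.Nodup := pv_keys_nodup.of_map

theorem pv_zeros_getD (merged : List String) (d : PySem.Dict String Int)
    (h : ∀ r, d.getD r 0 = 0) (r : String) :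
    (merged.foldl (fun d region => d.insert region 0) d).getD r 0 = 0 := by
  induction merged generalizing d with
  | nil => exact h r
  | cons x xs ih =>
      simp only [List.foldl_cons]
      exact ih _ (fun r' => by rw [PySem.Dict.getD_insert]; split <;> simp [h])

theorem pv_zeros_keys (merged : List String) (d : PySem.Dict String Int) :
    (merged.foldl (fun d region => d.insert region 0) d).keys = PySem.Set.update d.keys merged :=
  PySem.Dict.keys_foldl_insert merged (fun _ _ => 0) d

theorem pv_getD_nil (w : String) : (PySem.Dict.mk ([] : List (String × Int))).getD w 0 = 0 := rfl

theorem pv_getD_cons (w w' : String) (s : Int) (rest : List (String × Int)) :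
    (PySem.Dict.mk ((w, s) :: rest)).getD w' 0
      = if w = w' then s else (PySem.Dict.mk rest).getD w' 0 := by
  simp only [PySem.Dict.getD, PySem.Dict.get?_mk_cons, beq_iff_eq]
  split <;> rfl

theorem pv_getD_not_mem (w : String) (rest : List (String × Int))
    (hw : w ∉ rest.map Prod.fst) : (PySem.Dict.mk rest).getD w 0 = 0 := by
  have hc : (PySem.Dict.mk rest).contains w = false := by
    rw [PySem.Dict.contains_mk]
    rw [List.any_eq_false]
    intro p hp
    by_cases hpw : p.1 = w
    · exact absurd (hpw ▸ (List.mem_map_of_mem hp : p.1 ∈ rest.map Prod.fst)) hw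
    · simp [hpw]
  have hg := (PySem.Dict.get?_eq_none_iff_contains _ w).2 hc
  simp [PySem.Dict.getD, hg]

theorem pv_sum_update (l : List String) (w : String) (s : Int) (h : String → Int) (h0 : h w = 0) :
    (l.map (fun w' => if w = w' then s else h w')).sum
      = (l.map h).sum + (l.count w : Int) * s := by
  induction l with
  | nil => simp
  | cons x xs ih =>
      simp only [List.map_cons, List.sum_cons, List.count_cons, ih]
      by_cases hx : w = x
      · subst hx; simp [h0]; ring
      · have hxw : (x == w) = false := by simp [Ne.symm hx]
        simp [hx, hxw]; ring

theorem pv_RW_getD (r : String) :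
    pvRW.getD r [] = ((pvW2RList.map Prod.swap).filter (fun p => p.1 == r)).map (fun p => p.2) := by
  have h1 : pvRW = (pvW2RList.map Prod.swap).foldl
      (fun d p => d.modify p.1 [] (fun l => l ++ [p.2])) PySem.Dict.empty := by
    rw [List.foldl_map]
    rfl
  rw [h1, PySem.Dict.getD_foldl_modify_append]
  show (PySem.Dict.empty.getD r [] : List String) ++ _ = _
  simp [PySem.Dict.getD_empty]

theorem pv_count_RW (w r : String) :
    (pvRW.getD r []).count w
      = if (PySem.Dict.mk pvW2RList).get? w = some r then 1 else 0 := by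
  have hc : (pvRW.getD r []).count w = pvW2RList.count (w, r) := by
    rw [pv_RW_getD]
    simp [List.count, List.countP_map, List.countP_filter]
    apply List.countP_congr
    intro p _
    simp [Prod.swap, Bool.and_comm, Prod.ext_iff]
  rw [hc]
  by_cases hg : (PySem.Dict.mk pvW2RList).get? w = some r
  · rw [if_pos hg]
    exact List.count_eq_one_of_mem pv_list_nodup (PySem.Dict.mem_items_of_get?_eq_some _ hg)
  · rw [if_neg hg]
    refine List.count_eq_zero.2 (fun hmem => hg ?_)
    exact PySem.Dict.get?_of_mem_items _ hmem (by simpa using pv_keys_nodup)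

theorem pv_sumA_eq (ws : List (String × Int)) (hn : (ws.map Prod.fst).Nodup) (r : String) :
    pvSumA ws r = ((pvRW.getD r []).map (fun w => (PySem.Dict.mk ws).getD w 0)).sum := by
  induction ws with
  | nil => simp [pvSumA, pv_getD_nil]
  | cons q rest ih =>
      obtain ⟨w, s⟩ := q
      simp only [List.map_cons] at hn
      obtain ⟨hw, hrest⟩ := List.nodup_cons.1 hn
      have h0 : (PySem.Dict.mk rest).getD w 0 = 0 := pv_getD_not_mem w rest hw
      have hmap : ((pvRW.getD r []).map (fun w' => (PySem.Dict.mk ((w, s) :: rest)).getD w' 0))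
          = (pvRW.getD r []).map (fun w' => if w = w' then s else (PySem.Dict.mk rest).getD w' 0) :=
        List.map_congr_left (fun w' _ => pv_getD_cons w w' s rest)
      rw [hmap, pv_sum_update _ w s _ h0, pv_count_RW, ← ih hrest]
      simp only [pvSumA, List.map_cons, List.sum_cons]
      by_cases hg : (PySem.Dict.mk pvW2RList).get? w = some r
      · simp [hg]; ring
      · simp [hg]

theorem pv_foldA_keys (ws : List (String × Int)) (rs : PySem.Dict String Int) :
    (ws.foldl (fun rs p =>
      match (PySem.Dict.mk pvW2RList).get? p.1 with
      | some region => if rs.contains region then rs.modify region 0 (fun v => v + p.2) else rs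
      | none => rs) rs).keys = rs.keys := by
  induction ws generalizing rs with
  | nil => rfl
  | cons p ps ih =>
      rw [List.foldl_cons, ih]
      cases hg : (PySem.Dict.mk pvW2RList).get? p.1 with
      | none => rfl
      | some region =>
          by_cases hc : rs.contains region = true
          · simp only [hc, if_true]
            rw [PySem.Dict.keys_modify, PySem.Dict.keys_insert_of_contains]
            exact hc
          · simp only [if_neg hc]

theorem pv_foldA_getD (ws : List (String × Int)) (rs : PySem.Dict String Int) (r : String)
    (hr : rs.contains r = true) :
    (ws.foldl (fun rs p =>
      match (PySem.Dict.mk pvW2RList).get? p.1 with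
      | some region => if rs.contains region then rs.modify region 0 (fun v => v + p.2) else rs
      | none => rs) rs).getD r 0 = rs.getD r 0 + pvSumA ws r := by
  induction ws generalizing rs with
  | nil => simp [pvSumA]
  | cons p ps ih =>
      obtain ⟨w, s⟩ := p
      rw [List.foldl_cons]
      cases hg : (PySem.Dict.mk pvW2RList).get? w with
      | none =>
          have hs : pvSumA ((w, s) :: ps) r = pvSumA ps r := by simp [pvSumA, hg]
          rw [hs]
          exact ih rs hr
      | some region =>
          by_cases hc : rs.contains region = true
          · simp only [hc, if_true]
            have hr' : (rs.modify region 0 (fun v => v + s)).contains r = true := by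
              rw [PySem.Dict.contains_modify]; simp [hr]
            rw [ih _ hr', PySem.Dict.getD_modify]
            by_cases hrr : r = region
            · subst hrr
              simp [pvSumA, hg]
              ring
            · simp [pvSumA, hg, hrr]
              exact fun h => absurd h.symm hrr
          · simp only [if_neg hc]
            rw [ih rs hr]
            have hrr : region ≠ r := fun h => hc (h ▸ hr)
            simp [pvSumA, hg, hrr]

-- B's dedup-as-you-go loop produces exactly the deduplicated region list, mapped.
theorem pv_distribute_eq (wh : PySem.Dict String Int) (rs seen : List String) :
    pvDistribute wh seen rs
      = ((PySem.Set.update seen rs).drop seen.length).map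
          (fun r => (r, pvRegionTotal wh r)) := by
  induction rs generalizing seen with
  | nil => simp [pvDistribute, PySem.Set.update_nil, List.drop_length]
  | cons r rs ih =>
      rw [pvDistribute, PySem.Set.update_cons]
      by_cases hr : PySem.Set.contains seen r = true
      · have hmem : r ∈ seen := (PySem.Set.contains_iff seen r).1 hr
        rw [if_pos hr, PySem.Set.add_of_mem hmem, ih]
      · have hmem : r ∉ seen := fun h => hr ((PySem.Set.contains_iff seen r).2 h)
        rw [if_neg hr, PySem.Set.add_of_not_mem hmem, ih]
        obtain ⟨t, ht⟩ : ∃ t, PySem.Set.update (seen ++ [r]) rs = (seen ++ [r]) ++ t :=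
          ⟨_, PySem.Set.update_eq_append_filter (seen ++ [r]) rs⟩
        rw [ht, List.drop_left]
        have h2 : (seen ++ [r]) ++ t = seen ++ (r :: t) := by simp
        rw [h2, List.drop_left, List.map_cons]

-- ===== VERDICT (by name: the statement is the Claim_ definition above) =====
set_option maxRecDepth 10000 in
theorem distribute_stocks_to_merged_regions_spec : Claim_equal_distribute_stocks_to_merged_regions := by
  intro si mr _hdom hpre
  obtain ⟨hc, _houter, hinner⟩ := hpre
  unfold Spec_distribute_stocks_to_merged_regions
  obtain ⟨l, hl⟩ : ∃ l, (PySem.Dict.mk si).get? "warehouses" = some l := by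
    cases h : (PySem.Dict.mk si).get? "warehouses" with
    | none => rw [PySem.Dict.get?_eq_none_iff_contains] at h; rw [hc] at h; exact absurd h (by simp)
    | some l => exact ⟨l, rfl⟩
  have hlmem : ("warehouses", l) ∈ si := PySem.Dict.mem_items_of_get?_eq_some _ hl
  have hln : (l.map Prod.fst).Nodup := hinner _ hlmem
  unfold distribute_stocks_to_merged_regions distribute_stocks_to_merged_regions_alt
  simp only [hl, Option.getD_some]
  rw [pv_distribute_eq]
  have hzk : (mr.foldl (fun d region => d.insert region 0) (PySem.Dict.empty : PySem.Dict String Int)).keys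
      = (PySem.Set.update ([] : List String) mr).drop 0 := by
    rw [pv_zeros_keys, List.drop_zero]
    rfl
  have hkeys : (l.foldl (fun rs p =>
      match (PySem.Dict.mk pvW2RList).get? p.1 with
      | some region => if rs.contains region then rs.modify region 0 (fun v => v + p.2) else rs
      | none => rs) (mr.foldl (fun d region => d.insert region 0) (PySem.Dict.empty : PySem.Dict String Int))).keys
      = (PySem.Set.update ([] : List String) mr).drop 0 := by
    rw [pv_foldA_keys, hzk]
  have hnd : (l.foldl (fun rs p =>
      match (PySem.Dict.mk pvW2RList).get? p.1 with
      | some region => if rs.contains region then rs.modify region 0 (fun v => v + p.2) else rs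
      | none => rs) (mr.foldl (fun d region => d.insert region 0) (PySem.Dict.empty : PySem.Dict String Int))).keys.Nodup := by
    rw [hkeys, List.drop_zero, PySem.Set.update_nil_left]
    exact PySem.Set.nodup_ofList mr
  rw [PySem.Dict.items_eq_map_keys _ hnd 0, hkeys]
  apply List.map_congr_left
  intro r hrmem
  have hcont : (mr.foldl (fun d region => d.insert region 0) (PySem.Dict.empty : PySem.Dict String Int)).contains r = true := by
    rw [PySem.Dict.contains_iff_mem_keys, hzk]; exact hrmem
  rw [pv_foldA_getD l _ r hcont,
    pv_zeros_getD mr PySem.Dict.empty (fun r' => PySem.Dict.getD_empty r' 0),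
    pv_sumA_eq l hln r]
  show (_, _) = (_, _)
  congr 1
  rw [pvRegionTotal, ← pvRW_eq, PySem.List.foldl_add]
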